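-- pv_equiv track=rewrite | github.com/patricknevindwyer/advent_of_code_2015 | 03/puzzle_02.py | deliver
-- ===== SOURCE A (Python) =====
-- def deliver(dirs):
--
--     s_loc_x = 0
--     s_loc_y = 0
--
--     r_loc_x = 0
--     r_loc_y = 0
--
--     # track where we've delivered
--     deliveries = {}
--
--     # deliver our first spot
--     deliveries[(s_loc_x, s_loc_y)] = 1
--     deliveries[(r_loc_x, r_loc_y)] = 1
--
--     for step_idx in range(len(dirs)):
--         step = dirs[step_idx]
--
--         if step_idx % 2 == 0:
--             if step == ">":
--                 s_loc_x += 1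
--             if step == "<":
--                 s_loc_x -= 1
--             if step == "^":
--                 s_loc_y -= 1
--             if step == "v":
--                 s_loc_y += 1
--
--             # deliver
--             loc = (s_loc_x, s_loc_y)
--             if loc not in deliveries:
--                 deliveries[loc] = 0
--
--             deliveries[loc] += 1
--
--         else:
--             if step == ">":
--                 r_loc_x += 1
--             if step == "<":
--                 r_loc_x -= 1
--             if step == "^":
--                 r_loc_y -= 1
--             if step == "v":
--                 r_loc_y += 1
--
--             # deliver
--             loc = (r_loc_x, r_loc_y)
--             if loc not in deliveries:
--                 deliveries[loc] = 0
--
--             deliveries[loc] += 1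
--
--
--     return deliveries
-- ===== SOURCE B (Python) =====
-- def deliver(dirs):
--     DELTA = {">": (1, 0), "<": (-1, 0), "^": (0, -1), "v": (0, 1)}
--
--     # deal the directions into the two movers' alternating hands
--     santa_dirs = []
--     robo_dirs = []
--     santas_turn = True
--     for c in dirs:
--         if santas_turn:
--             santa_dirs.append(c)
--         else:
--             robo_dirs.append(c)
--         santas_turn = not santas_turn
--
--     def walk(moves):
--         x, y = 0, 0
--         trail = []
--         for c in moves:
--             dx, dy = DELTA.get(c, (0, 0))
--             x += dx
--             y += dy
--             trail.append((x, y))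
--         return trail
--
--     santa_trail = walk(santa_dirs)
--     robo_trail = walk(robo_dirs)
--
--     # interleave the two trails back into visit order
--     visits = []
--     for s, r in zip(santa_trail, robo_trail):
--         visits.append(s)
--         visits.append(r)
--     if len(santa_trail) > len(robo_trail):
--         visits.append(santa_trail[-1])
--
--     deliveries = {(0, 0): 1}
--     for loc in visits:
--         deliveries[loc] = deliveries.get(loc, 0) + 1
--     return deliveries
-- ===== Notes on version B (the rewrite author's own statement) =====
-- stated objective: alternative
-- what changed: Instead of one fused index loop that alternates on i%2 while mutating four coordinates and the dict with a membership test, B deals the directions into the two movers' hands, walks each hand independently to a trail of positions, interleaves the trails back into visit order, and counts visits in a separate pass with dict.get.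
import Mathlib
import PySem

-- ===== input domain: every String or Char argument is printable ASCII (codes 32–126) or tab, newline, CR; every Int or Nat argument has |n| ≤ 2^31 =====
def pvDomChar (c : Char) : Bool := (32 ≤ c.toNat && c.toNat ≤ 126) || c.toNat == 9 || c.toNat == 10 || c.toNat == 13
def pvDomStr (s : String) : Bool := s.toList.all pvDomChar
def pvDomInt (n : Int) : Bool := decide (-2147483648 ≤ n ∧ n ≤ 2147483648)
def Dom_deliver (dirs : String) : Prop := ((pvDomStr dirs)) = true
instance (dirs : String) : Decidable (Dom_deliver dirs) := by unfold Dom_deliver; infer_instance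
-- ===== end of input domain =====

-- B re-implements A by a different decomposition (deal the directions into two hands, walk each hand,
-- interleave the trails, count in a separate pass) instead of A's fused alternating index loop; same O(n) cost.

-- ===== PORT A =====
-- the loop body after `step = dirs[step_idx]` (four ifs per mover, membership test, then `+= 1`)
def deliverBody (st : Int × Int × Int × Int × PySem.Dict (Int × Int) Int) (i : Int) (step : Char) :
    Int × Int × Int × Int × PySem.Dict (Int × Int) Int :=
  match st with
  | (sx, sy, rx, ry, d) =>
    if PySem.Int.mod i 2 = 0 then
      let sx := if step = '>' then sx + 1 else sx
      let sx := if step = '<' then sx - 1 else sx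
      let sy := if step = '^' then sy - 1 else sy
      let sy := if step = 'v' then sy + 1 else sy
      let loc := (sx, sy)
      let d := if (d.get? loc).isNone then d.insert loc 0 else d
      let d := d.insert loc (d.getD loc 0 + 1)
      (sx, sy, rx, ry, d)
    else
      let rx := if step = '>' then rx + 1 else rx
      let rx := if step = '<' then rx - 1 else rx
      let ry := if step = '^' then ry - 1 else ry
      let ry := if step = 'v' then ry + 1 else ry
      let loc := (rx, ry)
      let d := if (d.get? loc).isNone then d.insert loc 0 else d
      let d := d.insert loc (d.getD loc 0 + 1)
      (sx, sy, rx, ry, d)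

def deliver (dirs : String) : List (Int × Int × Int) :=
  let d0 := ((PySem.Dict.empty).insert ((0 : Int), (0 : Int)) (1 : Int)).insert (0, 0) 1
  let fin := (PySem.List.pyRange 0 (PySem.Str.len dirs) 1).foldl
    -- `step = dirs[step_idx]`: the index is always in range here, so pyGetD is exact
    (fun st i => deliverBody st i (PySem.List.pyGetD dirs.toList i ' '))
    (0, 0, 0, 0, d0)
  fin.2.2.2.2.items.map (fun p => (p.1.1, p.1.2, p.2))

-- ===== PORT B =====
def pvDelta : PySem.Dict Char (Int × Int) :=
  PySem.Dict.ofList [('>', ((1 : Int), (0 : Int))), ('<', (-1, 0)), ('^', (0, -1)), ('v', (0, 1))]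

def pvDeal (cs : List Char) : List Char × List Char × Bool :=
  cs.foldl (fun st c =>
    match st with
    | (sd, rd, turn) => if turn then (sd ++ [c], rd, !turn) else (sd, rd ++ [c], !turn))
    ([], [], true)

def pvWalk (moves : List Char) : List (Int × Int) :=
  (moves.foldl (fun (st : Int × Int × List (Int × Int)) c =>
      match st with
      | (x, y, trail) =>
        let dd := pvDelta.getD c (0, 0)
        (x + dd.1, y + dd.2, trail ++ [(x + dd.1, y + dd.2)]))
    (0, 0, [])).2.2

def deliver_alt (dirs : String) : List (Int × Int × Int) :=
  let dealt := pvDeal dirs.toList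
  let santa := pvWalk dealt.1
  let robo := pvWalk dealt.2.1
  let visits := (santa.zip robo).foldl (fun acc p => acc ++ [p.1, p.2]) []
  let visits := if robo.length < santa.length then
      -- `santa_trail[-1]`: santa is nonempty in this branch, so pyGet? is some
      visits ++ [(PySem.List.pyGet? santa (-1)).getD (0, 0)]
    else visits
  let fin := visits.foldl (fun d loc => d.insert loc (d.getD loc 0 + 1))
      (PySem.Dict.ofList [(((0 : Int), (0 : Int)), (1 : Int))])
  fin.items.map (fun p => (p.1.1, p.1.2, p.2))

-- ===== PRECONDITION & SPEC =====
def Spec_deliver (dirs : String) (out : List (Int × Int × Int)) : Prop := out = deliver_alt dirs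
instance (dirs : String) (out : List (Int × Int × Int)) : Decidable (Spec_deliver dirs out) := by unfold Spec_deliver; infer_instance

-- ===== CLAIM (what is proved, stated in full; the proofs are below) =====
def Claim_equal_deliver : Prop := ∀ (dirs : String), Dom_deliver dirs → Spec_deliver dirs (deliver dirs)

-- ===== LEMMAS AND PROOFS =====

def pvStepPos (p : Int × Int) (c : Char) : Int × Int :=
  (p.1 + (pvDelta.getD c (0, 0)).1, p.2 + (pvDelta.getD c (0, 0)).2)

def pvBump (d : PySem.Dict (Int × Int) Int) (loc : Int × Int) : PySem.Dict (Int × Int) Int :=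
  d.insert loc (d.getD loc 0 + 1)

-- the sequence of delivery locations: first mover p steps, then the roles alternate
def pvVisits : List Char → (Int × Int) → (Int × Int) → List (Int × Int)
  | [], _, _ => []
  | c :: cs, p, q => pvStepPos p c :: pvVisits cs q (pvStepPos p c)

def pvSplit : List Char → List Char × List Char
  | [] => ([], [])
  | c :: cs => (c :: (pvSplit cs).2, (pvSplit cs).1)

def pvTrail : (Int × Int) → List Char → List (Int × Int)
  | _, [] => []
  | p, c :: cs => pvStepPos p c :: pvTrail (pvStepPos p c) cs

def pvIlv : List (Int × Int) → List (Int × Int) → List (Int × Int)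
  | [], _ => []
  | a :: as, bs => a :: pvIlv bs as
termination_by s r => s.length + r.length

theorem pvDelta_none (c : Char) (h1 : ¬c = '>') (h2 : ¬c = '<') (h3 : ¬c = '^') (h4 : ¬c = 'v') :
    pvDelta.getD c ((0 : Int), (0 : Int)) = (0, 0) := by
  have hit : pvDelta.items = [('>', ((1:Int),(0:Int))), ('<', (-1,0)), ('^', (0,-1)), ('v', (0,1))] := by decide
  have e1 : ('>' == c) = false := by simp [Ne.symm h1]
  have e2 : ('<' == c) = false := by simp [Ne.symm h2]
  have e3 : ('^' == c) = false := by simp [Ne.symm h3]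
  have e4 : ('v' == c) = false := by simp [Ne.symm h4]
  simp [PySem.Dict.getD, PySem.Dict.get?, hit, List.find?, e1, e2, e3, e4]

-- A's two x-ifs compute the delta-map x-step
theorem pvMoveX (x : Int) (c : Char) :
    (if c = '<' then (if c = '>' then x + 1 else x) - 1 else if c = '>' then x + 1 else x)
      = x + (pvDelta.getD c (0, 0)).1 := by
  by_cases h1 : c = '>'
  · subst h1; have hv : pvDelta.getD '>' ((0:Int),(0:Int)) = (1,0) := by decide
    simp [hv]
  by_cases h2 : c = '<'
  · subst h2; have hv : pvDelta.getD '<' ((0:Int),(0:Int)) = (-1,0) := by decide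
    simp [hv]; omega
  by_cases h3 : c = '^'
  · subst h3; have hv : pvDelta.getD '^' ((0:Int),(0:Int)) = (0,-1) := by decide
    simp [hv, h1, h2]
  by_cases h4 : c = 'v'
  · subst h4; have hv : pvDelta.getD 'v' ((0:Int),(0:Int)) = (0,1) := by decide
    simp [hv, h1, h2]
  · simp [pvDelta_none c h1 h2 h3 h4, h1, h2]

-- A's two y-ifs compute the delta-map y-step
theorem pvMoveY (y : Int) (c : Char) :
    (if c = 'v' then (if c = '^' then y - 1 else y) + 1 else if c = '^' then y - 1 else y)
      = y + (pvDelta.getD c (0, 0)).2 := by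
  by_cases h1 : c = '>'
  · subst h1; have hv : pvDelta.getD '>' ((0:Int),(0:Int)) = (1,0) := by decide
    simp [hv]
  by_cases h2 : c = '<'
  · subst h2; have hv : pvDelta.getD '<' ((0:Int),(0:Int)) = (-1,0) := by decide
    simp [hv]
  by_cases h3 : c = '^'
  · subst h3; have hv : pvDelta.getD '^' ((0:Int),(0:Int)) = (0,-1) := by decide
    simp [hv]; omega
  by_cases h4 : c = 'v'
  · subst h4; have hv : pvDelta.getD 'v' ((0:Int),(0:Int)) = (0,1) := by decide
    simp [hv]
  · simp [pvDelta_none c h1 h2 h3 h4, h3, h4]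

-- A's "if not in: set 0; then += 1" is one counting insert
theorem pvBumpA_eq (d : PySem.Dict (Int × Int) Int) (loc : Int × Int) :
    ((if (d.get? loc).isNone then d.insert loc 0 else d).insert loc
      ((if (d.get? loc).isNone then d.insert loc 0 else d).getD loc 0 + 1)) = pvBump d loc := by
  cases h : d.get? loc with
  | none =>
    simp only [pvBump, h, Option.isNone_none, if_pos, PySem.Dict.getD, PySem.Dict.get?_insert_self,
      Option.getD_some, Option.getD_none, PySem.Dict.insert_insert_self]
  | some v =>
    simp [pvBump, h, PySem.Dict.getD]

theorem deliverBody_even (i : Int) (hp : PySem.Int.mod i 2 = 0) (sx sy rx ry : Int)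
    (d : PySem.Dict (Int × Int) Int) (c : Char) :
    deliverBody (sx, sy, rx, ry, d) i c =
      ((pvStepPos (sx, sy) c).1, (pvStepPos (sx, sy) c).2, rx, ry, pvBump d (pvStepPos (sx, sy) c)) := by
  simp only [deliverBody, if_pos hp, pvMoveX, pvMoveY, pvStepPos, pvBumpA_eq]

theorem deliverBody_odd (i : Int) (hp : ¬ PySem.Int.mod i 2 = 0) (sx sy rx ry : Int)
    (d : PySem.Dict (Int × Int) Int) (c : Char) :
    deliverBody (sx, sy, rx, ry, d) i c =
      (sx, sy, (pvStepPos (rx, ry) c).1, (pvStepPos (rx, ry) c).2, pvBump d (pvStepPos (rx, ry) c)) := by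
  simp only [deliverBody, if_neg hp, pvMoveX, pvMoveY, pvStepPos, pvBumpA_eq]

-- A's fused loop, read off the dict component: it folds pvBump over the visit sequence
theorem pvLoopA (cs : List Char) : ∀ (i sx sy rx ry : Int) (d : PySem.Dict (Int × Int) Int),
    ((PySem.List.enumerate cs i).foldl (fun st p => deliverBody st p.1 p.2)
        (sx, sy, rx, ry, d)).2.2.2.2 =
      if PySem.Int.mod i 2 = 0 then (pvVisits cs (sx, sy) (rx, ry)).foldl pvBump d
      else (pvVisits cs (rx, ry) (sx, sy)).foldl pvBump d := by
  induction cs with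
  | nil => intro i sx sy rx ry d; simp [PySem.List.enumerate_nil]; split <;> rfl
  | cons c cs ih =>
    intro i sx sy rx ry d
    rw [PySem.List.enumerate_cons, List.foldl_cons]
    rw [show ((i, c) : Int × Char).1 = i from rfl, show ((i, c) : Int × Char).2 = c from rfl]
    have h2 : (0 : Int) < 2 := by norm_num
    by_cases hp : PySem.Int.mod i 2 = 0
    · have hp' : ¬ PySem.Int.mod (i + 1) 2 = 0 := by
        rw [PySem.Int.mod_eq_emod_of_pos h2] at hp ⊢; omega
      rw [deliverBody_even i hp, ih, if_neg hp', if_pos hp]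
      simp [pvVisits]
    · have hp' : PySem.Int.mod (i + 1) 2 = 0 := by
        rw [PySem.Int.mod_eq_emod_of_pos h2] at hp ⊢; omega
      rw [deliverBody_odd i hp, ih, if_pos hp', if_neg hp]
      simp [pvVisits]

-- the deal loop computes pvSplit (first two components)
theorem pvDealGo (cs : List Char) : ∀ (sd rd : List Char) (t : Bool),
    ((cs.foldl (fun st c =>
        match st with
        | (sd, rd, turn) => if turn then (sd ++ [c], rd, !turn) else (sd, rd ++ [c], !turn))
        (sd, rd, t)).1,
     (cs.foldl (fun st c =>
        match st with
        | (sd, rd, turn) => if turn then (sd ++ [c], rd, !turn) else (sd, rd ++ [c], !turn))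
        (sd, rd, t)).2.1) =
      if t then (sd ++ (pvSplit cs).1, rd ++ (pvSplit cs).2)
      else (sd ++ (pvSplit cs).2, rd ++ (pvSplit cs).1) := by
  induction cs with
  | nil => intro sd rd t; cases t <;> simp [pvSplit]
  | cons c cs ih =>
    intro sd rd t
    cases t <;> simp only [List.foldl_cons, Bool.not_true, Bool.not_false, reduceIte, pvSplit] <;>
      rw [ih] <;> simp

-- the walk loop computes pvTrail
theorem pvWalkGo (cs : List Char) : ∀ (x y : Int) (acc : List (Int × Int)),
    ((cs.foldl (fun (st : Int × Int × List (Int × Int)) c =>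
        match st with
        | (x, y, trail) =>
          let dd := pvDelta.getD c (0, 0)
          (x + dd.1, y + dd.2, trail ++ [(x + dd.1, y + dd.2)]))
      (x, y, acc)).2.2) = acc ++ pvTrail (x, y) cs := by
  induction cs with
  | nil => intro x y acc; simp [pvTrail]
  | cons c cs ih => intro x y acc; simp only [List.foldl_cons, pvTrail]; rw [ih]; simp [pvStepPos]

theorem pvWalk_eq (cs : List Char) : pvWalk cs = pvTrail (0, 0) cs := by
  unfold pvWalk; rw [pvWalkGo]; simp

-- the visit sequence is the interleaving of the two movers' trails
theorem pvVisits_eq_ilv (cs : List Char) : ∀ (p q : Int × Int),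
    pvVisits cs p q = pvIlv (pvTrail p (pvSplit cs).1) (pvTrail q (pvSplit cs).2) := by
  induction cs with
  | nil => intro p q; simp [pvVisits, pvSplit, pvTrail, pvIlv]
  | cons c cs ih =>
    intro p q
    simp only [pvVisits, pvSplit, pvTrail, pvIlv]
    rw [ih q (pvStepPos p c)]

theorem pvTrail_length (cs : List Char) : ∀ p, (pvTrail p cs).length = cs.length := by
  induction cs with
  | nil => intro p; rfl
  | cons c cs ih => intro p; simp [pvTrail, ih]

theorem pvSplit_length (cs : List Char) :
    (pvSplit cs).2.length ≤ (pvSplit cs).1.length ∧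
      (pvSplit cs).1.length ≤ (pvSplit cs).2.length + 1 := by
  induction cs with
  | nil => simp [pvSplit]
  | cons c cs ih => simp only [pvSplit, List.length_cons]; omega

-- B's zip-then-tail interleaving equals pvIlv when the lengths differ by at most one
theorem pvZip_ilv (s : List (Int × Int)) : ∀ (r : List (Int × Int)),
    r.length ≤ s.length → s.length ≤ r.length + 1 →
    (s.zip r).flatMap (fun p => [p.1, p.2]) ++
        (if r.length < s.length then [(PySem.List.pyGet? s (-1)).getD (0, 0)] else []) =
      pvIlv s r := by
  induction s with
  | nil =>
    intro r h1 h2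
    have : r = [] := by cases r with | nil => rfl | cons a as => simp at h1
    subst this; simp [pvIlv]
  | cons a as ih =>
    intro r h1 h2
    cases r with
    | nil =>
      have : as = [] := by cases as with | nil => rfl | cons b bs => simp at h2
      subst this
      simp [pvIlv, PySem.List.pyGet?_neg_one]
    | cons b bs =>
      simp only [List.zip_cons_cons, List.flatMap_cons, List.length_cons, pvIlv]
      have h1' : bs.length ≤ as.length := by simpa using h1
      have h2' : as.length ≤ bs.length + 1 := by simpa using h2
      rw [← ih bs h1' h2']
      by_cases hc : bs.length < as.length
      · have has : as ≠ [] := by intro h; subst h; simp at hc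
        rw [if_pos hc, if_pos (by omega)]
        rw [PySem.List.pyGet?_neg_one, PySem.List.pyGet?_neg_one]
        have hlast : (a :: as).getLast? = as.getLast? := by
          cases as with
          | nil => exact absurd rfl has
          | cons x xs => simp [List.getLast?_cons_cons]
        rw [hlast]
        simp
      · rw [if_neg hc, if_neg (by omega)]
        simp

-- the two seed dicts are the same association list
theorem pvSeed_eq :
    ((PySem.Dict.empty).insert ((0 : Int), (0 : Int)) (1 : Int)).insert (0, 0) 1 =
      PySem.Dict.ofList [(((0 : Int), (0 : Int)), (1 : Int))] := by decide

-- ===== VERDICT (by name: the statement is the Claim_ definition above) =====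
theorem deliver_spec : Claim_equal_deliver := by
  intro dirs _
  unfold Spec_deliver deliver deliver_alt
  -- A side: index loop → enumerate fold → pvBump fold over pvVisits
  have hA : (PySem.List.pyRange 0 (PySem.Str.len dirs) 1).foldl
      (fun st i => deliverBody st i (PySem.List.pyGetD dirs.toList i ' '))
      (0, 0, 0, 0, ((PySem.Dict.empty).insert ((0 : Int), (0 : Int)) (1 : Int)).insert (0, 0) 1) =
      (PySem.List.enumerate dirs.toList 0).foldl (fun st p => deliverBody st p.1 p.2)
      (0, 0, 0, 0, ((PySem.Dict.empty).insert ((0 : Int), (0 : Int)) (1 : Int)).insert (0, 0) 1) := by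
    rw [PySem.List.enumerate_eq_map_pyRange dirs.toList ' ', List.foldl_map]
    simp [PySem.List.len_eq, PySem.Str.len_eq]
  simp only [hA]
  rw [pvLoopA dirs.toList 0 0 0 0 0
      (((PySem.Dict.empty).insert ((0 : Int), (0 : Int)) (1 : Int)).insert (0, 0) 1)]
  rw [if_pos (by decide), pvSeed_eq]
  -- B side: deal → pvSplit, walk → pvTrail, zip/tail → pvIlv, and pvIlv = pvVisits
  have hdeal := pvDealGo dirs.toList [] [] true
  simp only [List.nil_append, reduceIte] at hdeal
  have hd1 : (pvDeal dirs.toList).1 = (pvSplit dirs.toList).1 := by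
    unfold pvDeal; exact congrArg Prod.fst hdeal
  have hd2 : (pvDeal dirs.toList).2.1 = (pvSplit dirs.toList).2 := by
    unfold pvDeal; exact congrArg Prod.snd hdeal
  rw [hd1, hd2, pvWalk_eq, pvWalk_eq]
  have hlen1 : (pvTrail ((0 : Int), (0 : Int)) (pvSplit dirs.toList).2).length ≤
      (pvTrail ((0 : Int), (0 : Int)) (pvSplit dirs.toList).1).length := by
    rw [pvTrail_length, pvTrail_length]; exact (pvSplit_length dirs.toList).1
  have hlen2 : (pvTrail ((0 : Int), (0 : Int)) (pvSplit dirs.toList).1).length ≤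
      (pvTrail ((0 : Int), (0 : Int)) (pvSplit dirs.toList).2).length + 1 := by
    rw [pvTrail_length, pvTrail_length]; exact (pvSplit_length dirs.toList).2
  rw [PySem.List.foldl_append_eq_flatMap (fun (p : (Int × Int) × (Int × Int)) => [p.1, p.2])]
  have hvis := pvZip_ilv (pvTrail ((0 : Int), (0 : Int)) (pvSplit dirs.toList).1)
      (pvTrail ((0 : Int), (0 : Int)) (pvSplit dirs.toList).2) hlen1 hlen2
  rw [← pvVisits_eq_ilv] at hvis
  have hfun : (fun (d : PySem.Dict (Int × Int) Int) (loc : Int × Int) =>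
      d.insert loc (d.getD loc 0 + 1)) = pvBump := by funext d loc; rfl
  by_cases hc : (pvTrail ((0 : Int), (0 : Int)) (pvSplit dirs.toList).2).length <
      (pvTrail ((0 : Int), (0 : Int)) (pvSplit dirs.toList).1).length
  · rw [if_pos hc] at hvis ⊢
    simp only [List.nil_append] at hvis ⊢
    rw [hvis, hfun]
  · rw [if_neg hc] at hvis ⊢
    simp only [List.append_nil, List.nil_append] at hvis ⊢
    rw [hvis, hfun]
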